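-- pv_equiv track=rewrite | github.com/gitika-bose/ResearchSpring2019 | text-recognition/google_cloud/create_dataset/get_all_data.py | only_alpha
-- ===== SOURCE A (Python) =====
-- def only_alpha(name):
--     start, end = 0, 0
--     for i in range(len(name)):
--         word=name[i]
--         if str(word).isalpha():
--             start=i
--             break
--     for i in range(len(name)-1,-1,-1):
--         word=name[i]
--         if str(word).isalpha():
--             end=i
--             break
--     name = name[start:end+1]
--     name.strip()
--     return name
-- ===== SOURCE B (Python) =====
-- def only_alpha(name):
--     idx = [i for i, c in enumerate(name) if c.isalpha()]
--     if not idx: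
--         return ""
--     return name[idx[0]:idx[-1] + 1]
-- ===== Notes on version B (the rewrite author's own statement) =====
-- stated objective: simpler
-- what changed: Replaced the two directional early-exit index scans by a single comprehension collecting all alphabetic indices and one slice from the first to the last; the redundant no-op strip() is dropped.
-- intended difference: On non-empty strings with no alphabetic character, A returns the first character (leftover start=end=0 slice [0:1]) while B returns the empty string, which is the intended result of trimming to the alphabetic core when there is none. — e.g. on only_alpha("7"): A returns "7", B returns ""
import Mathlib
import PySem

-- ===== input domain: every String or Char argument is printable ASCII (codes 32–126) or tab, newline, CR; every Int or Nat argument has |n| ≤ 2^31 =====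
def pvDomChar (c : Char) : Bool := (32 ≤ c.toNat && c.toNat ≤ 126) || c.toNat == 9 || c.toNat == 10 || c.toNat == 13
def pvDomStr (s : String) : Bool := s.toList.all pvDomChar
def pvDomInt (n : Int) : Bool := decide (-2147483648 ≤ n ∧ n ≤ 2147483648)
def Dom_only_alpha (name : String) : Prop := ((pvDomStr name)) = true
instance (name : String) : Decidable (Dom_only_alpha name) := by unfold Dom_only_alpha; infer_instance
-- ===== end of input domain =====

-- B replaces A's two directional early-exit scans by one comprehension of all alphabetic
-- indices and a single slice (objective: simpler); on strings with letters it equals A,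
-- and on non-empty all-non-alphabetic strings it returns "" where A returns the first
-- character (stated as the intended difference D_ below). A's 'name.strip()' result is
-- discarded by A itself, so it is dropped.

-- ===== PORT A =====
-- one 'for i in range(...)' loop with break, shared by both of A's loops (default 0 when no break fires);
-- the 'none' branch of pyGet? is unreachable (every scanned index is in range) and only makes the match total
def onlyAlphaScan (cs : List Char) : List Int → Int
  | [] => 0
  | i :: rest =>
    match PySem.List.pyGet? cs i with
    | some w => if PySem.Chars.isalpha w then i else onlyAlphaScan cs rest
    | none => 0

def only_alpha (name : String) : String :=
  let cs := name.toList
  let start := onlyAlphaScan cs (PySem.List.pyRange 0 (cs.length : Int) 1)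
  let e := onlyAlphaScan cs (PySem.List.pyRange ((cs.length : Int) - 1) (-1) (-1))
  -- name = name[start:end+1]; name.strip() is computed and discarded by A
  String.ofList (PySem.List.slice cs (some start) (some (e + 1)))

-- ===== PORT B =====
def only_alpha_alt (name : String) : String :=
  let cs := name.toList
  let idx := ((PySem.List.enumerate cs).filter (fun p => PySem.Chars.isalpha p.2)).map (fun p => p.1)
  match idx with
  | [] => ""
  | i0 :: _ =>
    String.ofList (PySem.List.slice cs (some i0) (some (PySem.List.pyGetD idx (-1) 0 + 1)))

-- ===== PRECONDITION & SPEC =====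
-- On non-empty strings with no alphabetic character, A returns the first character
-- (leftover start=end=0 slice [0:1]) while B returns "", the intended result of
-- trimming to the alphabetic core when there is none.
def D_only_alpha (name : String) : Prop :=
  name.toList ≠ [] ∧ name.toList.all (fun c => !PySem.Chars.isalpha c) = true
instance (name : String) : Decidable (D_only_alpha name) := by unfold D_only_alpha; infer_instance

def Spec_only_alpha (name : String) (out : String) : Prop := ¬ D_only_alpha name → out = only_alpha_alt name
instance (name : String) (out : String) : Decidable (Spec_only_alpha name out) := by unfold Spec_only_alpha; infer_instance

def pvDiffWitness_only_alpha : String := "7"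
def pvDiffWitnessOut_only_alpha : String × String := ("7", "")

-- ===== CLAIM (what is proved, stated in full; the proofs are below) =====
def Claim_unchanged_only_alpha : Prop := ∀ (name : String), Dom_only_alpha name → Spec_only_alpha name (only_alpha name)
def Claim_changed_only_alpha : Prop := Dom_only_alpha (pvDiffWitness_only_alpha) ∧ D_only_alpha (pvDiffWitness_only_alpha) ∧ only_alpha (pvDiffWitness_only_alpha) = pvDiffWitnessOut_only_alpha.1 ∧ only_alpha_alt (pvDiffWitness_only_alpha) = pvDiffWitnessOut_only_alpha.2 ∧ pvDiffWitnessOut_only_alpha.1 ≠ pvDiffWitnessOut_only_alpha.2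
def Claim_exact_only_alpha : Prop := ∀ (name : String), Dom_only_alpha name → D_only_alpha name → only_alpha name ≠ only_alpha_alt name

-- ===== LEMMAS AND PROOFS =====

-- the index list B builds, generalized over the enumerate start offset
def alphaIdx (cs : List Char) (k : Int) : List Int :=
  ((PySem.List.enumerate cs k).filter (fun p => PySem.Chars.isalpha p.2)).map (fun p => p.1)

theorem alphaIdx_nil (k : Int) : alphaIdx [] k = [] := rfl

theorem alphaIdx_cons (c : Char) (t : List Char) (k : Int) :
    alphaIdx (c :: t) k =
      if PySem.Chars.isalpha c then k :: alphaIdx t (k + 1) else alphaIdx t (k + 1) := by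
  simp [alphaIdx, PySem.List.enumerate]
  split <;> simp_all

theorem alphaIdx_append_singleton (t : List Char) (c : Char) (k : Int) :
    alphaIdx (t ++ [c]) k =
      alphaIdx t k ++ (if PySem.Chars.isalpha c then [k + (t.length : Int)] else []) := by
  induction t generalizing k with
  | nil => simp [alphaIdx_nil, alphaIdx_cons]
  | cons d t ih =>
    rw [List.cons_append, alphaIdx_cons, alphaIdx_cons, ih]
    split <;> simp <;> ring_nf

-- alphaIdx is empty exactly when no character is alphabetic
theorem alphaIdx_eq_nil_iff (cs : List Char) (k : Int) :
    alphaIdx cs k = [] ↔ cs.all (fun c => !PySem.Chars.isalpha c) = true := by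
  induction cs generalizing k with
  | nil => simp [alphaIdx_nil]
  | cons c t ih =>
    rw [alphaIdx_cons]
    by_cases hc : PySem.Chars.isalpha c
    · simp [hc]
    · simp [hc, ih (k + 1)]

-- descending range(a, -1, -1) in closed form and its one-step unfolding
-- (not covered by the pyRange_one_* lemmas, which are for step 1)
theorem pyRange_desc_eq (a : Int) :
    PySem.List.pyRange a (-1) (-1) = (List.range (a + 1).toNat).map (fun (k : Nat) => a - (k : Int)) := by
  simp only [PySem.List.pyRange]
  rw [if_neg (by norm_num : ¬ (-1 : Int) = 0), if_neg (by norm_num : ¬ (0 : Int) < -1)]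
  by_cases h : (-1 : Int) < a
  · rw [if_pos h]
    have h1 : (a - -1 + -(-1) - 1) / -(-1) = a + 1 := by norm_num
    rw [h1]
    apply List.map_congr_left
    intro x _
    ring
  · rw [if_neg h]
    have h0 : (a + 1).toNat = 0 := by omega
    simp [h0]

theorem pyRange_desc_cons (a : Int) (h : 0 ≤ a) :
    PySem.List.pyRange a (-1) (-1) = a :: PySem.List.pyRange (a - 1) (-1) (-1) := by
  rw [pyRange_desc_eq, pyRange_desc_eq]
  have h1 : (a + 1).toNat = a.toNat + 1 := by omega
  have h2 : (a - 1 + 1).toNat = a.toNat := by omega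
  rw [h1, h2, List.range_succ_eq_map, List.map_cons, List.map_map]
  congr 1
  · simp
  · apply List.map_congr_left
    intro x _
    simp [Function.comp]
    ring

theorem onlyAlphaScan_cons_some (cs : List Char) (i : Int) (rest : List Int) (w : Char)
    (h : PySem.List.pyGet? cs i = some w) :
    onlyAlphaScan cs (i :: rest) = if PySem.Chars.isalpha w then i else onlyAlphaScan cs rest := by
  simp [onlyAlphaScan, h]

-- A's forward scan returns the FIRST alphabetic index of the unscanned suffix t (0 if none),
-- i.e. the head of B's index list for t
theorem scan_asc (t : List Char) : ∀ (pre full : List Char), full = pre ++ t →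
    onlyAlphaScan full (PySem.List.pyRange (pre.length : Int) (full.length : Int) 1) =
      (alphaIdx t (pre.length : Int)).headD 0 := by
  induction t with
  | nil =>
    intro pre full h
    subst h
    simp [alphaIdx_nil, onlyAlphaScan]
  | cons c t ih =>
    intro pre full h
    subst h
    have hlt : (pre.length : Int) < ((pre ++ c :: t).length : Int) := by
      simp
    rw [PySem.List.pyRange_one_cons hlt,
      onlyAlphaScan_cons_some _ _ _ c (PySem.List.pyGet?_append_length pre t c), alphaIdx_cons]
    by_cases hc : PySem.Chars.isalpha c
    · simp [hc]
    · rw [if_neg hc, if_neg hc]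
      have := ih (pre ++ [c]) (pre ++ c :: t) (by simp)
      simpa using this

-- A's backward scan returns the LAST alphabetic index of the scanned prefix cs (0 if none),
-- i.e. the last element of B's index list for cs
theorem scan_desc (cs : List Char) : ∀ (suf full : List Char), full = cs ++ suf →
    onlyAlphaScan full (PySem.List.pyRange ((cs.length : Int) - 1) (-1) (-1)) =
      (alphaIdx cs 0).getLastD 0 := by
  induction cs using List.reverseRecOn with
  | nil =>
    intro suf full h
    have hr : PySem.List.pyRange ((((([] : List Char)).length : Int)) - 1) (-1) (-1) = [] := by
      rw [pyRange_desc_eq]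
      simp
    rw [hr]
    simp [alphaIdx_nil, onlyAlphaScan]
  | append_singleton t c ih =>
    intro suf full h
    subst h
    have hlen : (((t ++ [c]).length : Int)) - 1 = (t.length : Int) := by simp
    have hget : PySem.List.pyGet? ((t ++ [c]) ++ suf) (t.length : Int) = some c := by
      simp
    rw [hlen, pyRange_desc_cons _ (by positivity),
      onlyAlphaScan_cons_some _ _ _ c hget, alphaIdx_append_singleton]
    by_cases hc : PySem.Chars.isalpha c
    · simp [hc]
    · rw [if_neg hc, if_neg hc]
      have := ih (c :: suf) (t ++ [c] ++ suf) (by simp)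
      simpa using this

-- A in closed form via B's index list
theorem only_alpha_eq_slice (name : String) :
    only_alpha name = String.ofList (PySem.List.slice name.toList
      (some ((alphaIdx name.toList 0).headD 0))
      (some ((alphaIdx name.toList 0).getLastD 0 + 1))) := by
  unfold only_alpha
  have hs := scan_asc name.toList [] name.toList (by simp)
  have he := scan_desc name.toList [] name.toList (by simp)
  simp only [List.length_nil, Nat.cast_zero] at hs
  simp only [hs, he]

theorem only_alpha_agrees (name : String) (h : ¬ D_only_alpha name) :
    only_alpha name = only_alpha_alt name := by
  rw [only_alpha_eq_slice]
  unfold only_alpha_alt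
  have hidx : ((PySem.List.enumerate name.toList).filter (fun p => PySem.Chars.isalpha p.2)).map
      (fun p => p.1) = alphaIdx name.toList 0 := rfl
  simp only [hidx]
  cases heq : alphaIdx name.toList 0 with
  | nil =>
    -- no alphabetic character: ¬ D_ forces name = ""
    have hall := (alphaIdx_eq_nil_iff name.toList 0).mp heq
    have hnil : name.toList = [] := by
      by_contra hne
      exact h ⟨hne, hall⟩
    simp [hnil, PySem.List.slice]
  | cons i0 tail =>
    rw [PySem.List.pyGetD_neg_one _ 0 (by simp : i0 :: tail ≠ [])]
    simp [List.getLastD_eq_getLast?, List.getLast?_eq_some_getLast (l := i0 :: tail) (by simp)]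

-- ===== VERDICT (by name: the statement is the Claim_ definition above) =====
theorem only_alpha_spec : Claim_unchanged_only_alpha := by
  intro name _ hnd
  exact only_alpha_agrees name hnd

theorem only_alpha_changed : Claim_changed_only_alpha := by
  unfold Claim_changed_only_alpha; decide

theorem only_alpha_tight : Claim_exact_only_alpha := by
  intro name _ hd
  rcases hd with ⟨hne, hall⟩
  have heq : alphaIdx name.toList 0 = [] := (alphaIdx_eq_nil_iff name.toList 0).mpr hall
  have hidx : ((PySem.List.enumerate name.toList).filter (fun p => PySem.Chars.isalpha p.2)).map
      (fun p => p.1) = alphaIdx name.toList 0 := rfl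
  have halt : only_alpha_alt name = "" := by
    unfold only_alpha_alt
    simp only [hidx, heq]
  rw [only_alpha_eq_slice, heq, halt]
  intro hcontra
  -- A's value is name[0:1], a one-character string since name ≠ ""
  cases hl : name.toList with
  | nil => exact hne hl
  | cons c t =>
    rw [hl] at hcontra
    have h01 : PySem.List.slice (c :: t) (some ((0 : Int))) (some (1 : Int)) = [c] := by
      have := PySem.List.slice_natCast (c :: t) 0 1
      simpa using this
    simp only [List.headD_nil, List.getLastD_nil] at hcontra
    rw [show ((0:Int) + 1) = (1:Int) by ring] at hcontra
    rw [h01] at hcontra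
    have := congrArg String.toList hcontra
    simp at this
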